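-- pv_equiv track=rewrite | github.com/Stranmor/oven | fix_unwrap_context.py | append_ok
-- ===== SOURCE A (Python) =====
-- def append_ok(content):
--     lines = content.split('\n')
--     for i, line in enumerate(lines):
--         if line.startswith("    async fn test_") and "-> anyhow::Result<()> {" in line:
--             # find end of function
--             brackets = 1
--             for j in range(i+1, len(lines)):
--                 if "{" in lines[j]: brackets += lines[j].count("{")
--                 if "}" in lines[j]: brackets -= lines[j].count("}")
--                 if brackets == 0:
--                     # found end
--                     lines.insert(j, "        Ok(())")
--                     break
--     return '\n'.join(lines)
-- ===== SOURCE B (Python) =====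
-- def append_ok(content):
--     OK = "        Ok(())"
--     out = []
--     active = []  # brace balances of test fns still awaiting their closing line, in header order
--     for line in content.split('\n'):
--         delta = line.count('{') - line.count('}')
--         updated = [b + delta for b in active]
--         closed = updated.count(0)
--         active = [b for b in updated if b != 0]
--         out.extend([OK] * closed)
--         out.append(line)
--         if line.startswith("    async fn test_") and "-> anyhow::Result<()> {" in line:
--             active.append(1)
--     return '\n'.join(out)
-- ===== Notes on version B (the rewrite author's own statement) =====
-- stated objective: alternative
-- what changed: A mutates the line list in place, rescanning the braces of each test fn body from scratch for every header it meets; B is a single left-to-right pass that carries the brace balances of all still-open test fns and emits the inserted line for each when its balance reaches zero.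
import Mathlib
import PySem

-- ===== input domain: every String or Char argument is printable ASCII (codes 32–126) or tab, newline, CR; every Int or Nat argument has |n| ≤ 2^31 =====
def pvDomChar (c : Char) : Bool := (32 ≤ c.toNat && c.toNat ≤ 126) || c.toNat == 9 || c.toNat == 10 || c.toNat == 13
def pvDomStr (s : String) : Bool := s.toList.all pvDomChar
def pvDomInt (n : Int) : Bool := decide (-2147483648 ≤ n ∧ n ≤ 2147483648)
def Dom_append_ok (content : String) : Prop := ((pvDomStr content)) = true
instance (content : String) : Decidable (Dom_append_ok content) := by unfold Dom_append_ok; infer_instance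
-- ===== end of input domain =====

-- B replaces A's mutate-in-place rescans (a fresh inner brace scan per header) by one left-to-right
-- pass that carries the brace balances of all open test fns and emits each "Ok(())" at its closing
-- line; objective: alternative (single pass, no re-scanning / no in-place insertion).


-- ===== PORT A =====
def pvOkLine : String := "        Ok(())"

def pvIsHeader (l : String) : Bool :=
  PySem.Str.startswith l "    async fn test_" && PySem.Str.isIn "-> anyhow::Result<()> {" l

-- A's inner loop: scan lines after the header with counter `brackets`, insert "        Ok(())"
-- before the first line where the counter reaches 0 (no change if it never does).
def pvTryInsert : List String → Int → List String
  | [], _ => []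
  | l :: rest, brackets =>
      let b1 : Int := if PySem.Str.isIn "{" l then brackets + PySem.Str.count l "{" else brackets
      let b2 : Int := if PySem.Str.isIn "}" l then b1 - PySem.Str.count l "}" else b1
      if b2 = 0 then pvOkLine :: l :: rest else l :: pvTryInsert rest b2

lemma pvIsHeader_okLine : pvIsHeader pvOkLine = false := by decide

lemma countP_pvTryInsert (todo : List String) (b : Int) :
    (pvTryInsert todo b).countP (fun l => pvIsHeader l) = todo.countP (fun l => pvIsHeader l) := by
  induction todo generalizing b with
  | nil => rfl
  | cons l rest ih =>
      simp only [pvTryInsert]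
      split_ifs <;> simp [List.countP_cons, pvIsHeader_okLine, ih]

lemma length_pvTryInsert_le (todo : List String) (b : Int) :
    (pvTryInsert todo b).length ≤ todo.length + 1 := by
  induction todo generalizing b with
  | nil => simp [pvTryInsert]
  | cons l rest ih =>
      simp only [pvTryInsert]
      split_ifs <;> first
        | (simp; exact ih _)
        | simp

-- A's outer loop: walk the (mutated) list left to right; already-emitted lines are final because
-- every insertion of the inner loop happens strictly to the right of the current position.
def pvARun : List String → List String
  | [] => []
  | l :: todo =>
      l :: pvARun (if pvIsHeader l then pvTryInsert todo 1 else todo)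
termination_by todo => 2 * todo.countP (fun l => pvIsHeader l) + todo.length
decreasing_by
  by_cases h : pvIsHeader l = true
  · have h1 := countP_pvTryInsert todo 1
    have h2 := length_pvTryInsert_le todo 1
    simp [h, h1]
    omega
  · simp [h]

def append_ok (content : String) : String :=
  -- content.split('\n'): split? is none only for an empty separator, so getD is never taken
  let lines := (PySem.Str.split? content "\n").getD []
  PySem.Str.join "\n" (pvARun lines)

-- ===== PORT B =====
-- B's single pass: `active` holds the brace balance of each test fn still awaiting its close.
def pvBPass : List String → List Int → List String
  | [], _ => []
  | l :: rest, active =>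
      let delta : Int := (PySem.Str.count l "{" : Int) - (PySem.Str.count l "}" : Int)
      let updated := active.map (fun b => b + delta)
      let closed := updated.count 0
      let kept := updated.filter (fun b => b ≠ 0)
      List.replicate closed pvOkLine ++
        l :: pvBPass rest (if pvIsHeader l then kept ++ [1] else kept)

def append_ok_alt (content : String) : String :=
  let lines := (PySem.Str.split? content "\n").getD []
  PySem.Str.join "\n" (pvBPass lines [])

-- ===== PRECONDITION & SPEC =====
def Spec_append_ok (content : String) (out : String) : Prop := out = append_ok_alt content
instance (content : String) (out : String) : Decidable (Spec_append_ok content out) := by unfold Spec_append_ok; infer_instance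

-- ===== CLAIM (what is proved, stated in full; the proofs are below) =====
def Claim_equal_append_ok : Prop := ∀ (content : String), Dom_append_ok content → Spec_append_ok content (append_ok content)

-- ===== LEMMAS AND PROOFS =====

-- a substring that does not occur in s is counted 0 times
lemma count_go_of_not_infix (sub : List Char) :
    ∀ (fuel : Nat) (s : List Char) (acc : Nat), ¬ sub <:+: s →
      PySem.Chars.count.go sub fuel s acc = acc := by
  intro fuel
  induction fuel with
  | zero => intro s acc _; cases s <;> rfl
  | succ fuel ih =>
      intro s acc h
      cases s with
      | nil => rfl
      | cons c t =>
          have hpre : sub.isPrefixOf (c :: t) = false := by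
            by_contra hp
            exact h ((List.isPrefixOf_iff_prefix.mp (by simpa using hp)).isInfix)
          have ht : ¬ sub <:+: t := fun hi => h (List.infix_cons hi)
          simp only [PySem.Chars.count.go, hpre]
          exact ih t acc ht

lemma chars_count_eq_zero (s sub : List Char) (h : PySem.Chars.isIn sub s = false) :
    PySem.Chars.count s sub = 0 := by
  have hinf : ¬ sub <:+: s := (PySem.Chars.isIn_eq_false_iff sub s).mp h
  have hne : sub ≠ [] := by
    intro he
    rw [he] at hinf
    exact hinf List.nil_infix
  unfold PySem.Chars.count
  simp only [List.isEmpty_iff, hne, if_false]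
  exact count_go_of_not_infix _ _ _ _ hinf

-- the "{ in l" / "} in l" guards of A's inner loop are redundant: one step is one delta
lemma pvTryInsert_cons (l : String) (rest : List String) (b : Int) :
    pvTryInsert (l :: rest) b =
      (if b + ((PySem.Str.count l "{" : Int) - (PySem.Str.count l "}" : Int)) = 0
       then pvOkLine :: l :: rest
       else l :: pvTryInsert rest (b + ((PySem.Str.count l "{" : Int) - (PySem.Str.count l "}" : Int)))) := by
  simp only [pvTryInsert]
  have z1 : ∀ sub : String, PySem.Str.isIn sub l = false → PySem.Str.count l sub = 0 := by
    intro sub hsub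
    rw [PySem.Str.count_eq]
    exact chars_count_eq_zero _ _ (by simpa using hsub)
  have e1 : (if PySem.Str.isIn "{" l = true then b + (PySem.Str.count l "{" : Int) else b)
      = b + (PySem.Str.count l "{" : Int) := by
    split_ifs with h
    · rfl
    · simp only [z1 "{" (by simpa using h), Nat.cast_zero, add_zero]
  have e2 : ∀ x : Int, (if PySem.Str.isIn "}" l = true then x - (PySem.Str.count l "}" : Int) else x)
      = x - (PySem.Str.count l "}" : Int) := by
    intro x
    split_ifs with h
    · rfl
    · simp only [z1 "}" (by simpa using h), Nat.cast_zero, sub_zero]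
  rw [e1, e2, add_sub_assoc]

lemma pvTryInsert_replicate (k : Nat) (l : String) (rest : List String) (b : Int) (hb : b ≠ 0) :
    pvTryInsert (List.replicate k pvOkLine ++ l :: rest) b =
      (if b + ((PySem.Str.count l "{" : Int) - (PySem.Str.count l "}" : Int)) = 0
       then List.replicate (k + 1) pvOkLine ++ l :: rest
       else List.replicate k pvOkLine ++ l :: pvTryInsert rest (b + ((PySem.Str.count l "{" : Int) - (PySem.Str.count l "}" : Int)))) := by
  induction k with
  | zero =>
      simpa using pvTryInsert_cons l rest b
  | succ k ih =>
      have hok₁ : PySem.Str.count pvOkLine "{" = 0 := by decide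
      have hok₂ : PySem.Str.count pvOkLine "}" = 0 := by decide
      rw [List.replicate_succ, List.cons_append, pvTryInsert_cons]
      simp only [hok₁, hok₂, Nat.cast_zero, sub_self, add_zero]
      rw [if_neg hb, ih]
      split_ifs
      · simp [List.replicate_succ]
      · simp

-- applying A's insertions for all pending headers sequentially = one simultaneous step
lemma foldl_pvTryInsert (active : List Int) (k : Nat) (l : String) (rest : List String)
    (h : ∀ b ∈ active, b ≠ 0) :
    List.foldl pvTryInsert (List.replicate k pvOkLine ++ l :: rest) active =
      List.replicate (k + (active.map (fun b => b + ((PySem.Str.count l "{" : Int) - (PySem.Str.count l "}" : Int)))).count 0) pvOkLine ++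
        l :: List.foldl pvTryInsert rest
          ((active.map (fun b => b + ((PySem.Str.count l "{" : Int) - (PySem.Str.count l "}" : Int)))).filter (fun b => b ≠ 0)) := by
  induction active generalizing k rest with
  | nil => simp
  | cons b as ih =>
      have hb : b ≠ 0 := h b (List.mem_cons_self ..)
      have has : ∀ x ∈ as, x ≠ 0 := fun x hx => h x (List.mem_cons_of_mem _ hx)
      simp only [List.foldl_cons, List.map_cons]
      rw [pvTryInsert_replicate k l rest b hb]
      by_cases hc : b + ((PySem.Str.count l "{" : Int) - (PySem.Str.count l "}" : Int)) = 0
      · rw [if_pos hc, ih (k + 1) rest has]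
        rw [List.count_cons, List.filter_cons]
        have hbeq : (b + ((PySem.Str.count l "{" : Int) - (PySem.Str.count l "}" : Int)) == 0) = true := by
          simpa using hc
        have hdec : (decide (b + ((PySem.Str.count l "{" : Int) - (PySem.Str.count l "}" : Int)) ≠ 0)) = false := by
          simpa using hc
        rw [hbeq, hdec]
        simp only [if_true, Bool.false_eq_true, if_false]
        rw [Nat.add_assoc, Nat.add_comm 1]
      · rw [if_neg hc, ih k _ has]
        rw [List.count_cons, List.filter_cons]
        have hbeq : (b + ((PySem.Str.count l "{" : Int) - (PySem.Str.count l "}" : Int)) == 0) = false := by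
          simpa using hc
        have hdec : (decide (b + ((PySem.Str.count l "{" : Int) - (PySem.Str.count l "}" : Int)) ≠ 0)) = true := by
          simpa using hc
        rw [hbeq, hdec]
        simp [List.foldl_cons]

lemma pvARun_replicate (k : Nat) (xs : List String) :
    pvARun (List.replicate k pvOkLine ++ xs) = List.replicate k pvOkLine ++ pvARun xs := by
  induction k with
  | zero => simp
  | succ k ih =>
      rw [List.replicate_succ, List.cons_append, pvARun]
      simp [pvIsHeader_okLine, ih]

lemma foldl_pvTryInsert_nil (active : List Int) :
    List.foldl pvTryInsert [] active = [] := by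
  induction active with
  | nil => rfl
  | cons b as ih => simpa [pvTryInsert] using ih

-- main invariant: A's list with all pending insertions already materialised, walked by the
-- outer loop, produces exactly B's single pass carrying those balances
lemma pvARun_foldl (todo : List String) (active : List Int) (h : ∀ b ∈ active, b ≠ 0) :
    pvARun (List.foldl pvTryInsert todo active) = pvBPass todo active := by
  induction todo generalizing active with
  | nil => rw [foldl_pvTryInsert_nil]; simp [pvARun, pvBPass]
  | cons l rest ih =>
      have hfold := foldl_pvTryInsert active 0 l rest h
      simp only [List.replicate_zero, List.nil_append] at hfold
      rw [hfold, pvARun_replicate, pvARun]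
      have hkept : ∀ x ∈ (active.map (fun b => b + ((PySem.Str.count l "{" : Int) - (PySem.Str.count l "}" : Int)))).filter (fun b => b ≠ 0), x ≠ 0 := by
        intro x hx
        simpa using (List.mem_filter.mp hx).2
      by_cases hh : pvIsHeader l = true
      · rw [if_pos hh]
        rw [show pvTryInsert (List.foldl pvTryInsert rest ((active.map (fun b => b + ((PySem.Str.count l "{" : Int) - (PySem.Str.count l "}" : Int)))).filter (fun b => b ≠ 0))) 1
              = List.foldl pvTryInsert rest (((active.map (fun b => b + ((PySem.Str.count l "{" : Int) - (PySem.Str.count l "}" : Int)))).filter (fun b => b ≠ 0)) ++ [1]) by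
              rw [List.foldl_append]; rfl]
        rw [ih _ (by intro x hx; rcases List.mem_append.mp hx with hx | hx;
                     exact hkept x hx; simp at hx; omega)]
        simp [pvBPass, hh]
      · rw [if_neg hh, ih _ hkept]
        simp [pvBPass, hh]

-- ===== VERDICT (by name: the statement is the Claim_ definition above) =====
theorem append_ok_spec : Claim_equal_append_ok := by
  intro content _
  unfold Spec_append_ok append_ok append_ok_alt
  have := pvARun_foldl ((PySem.Str.split? content "\n").getD []) [] (by simp)
  simpa using congrArg (PySem.Str.join "\n") this
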